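-- pv_equiv track=rewrite | github.com/DumpDumpDump/Name-Sorter | name_sorter.py | Sort_Name
-- ===== SOURCE A (Python) =====
-- def Last_To_First_Name(Name):
-- 	TempArrName = Name.split(" ")
-- 	TempArrName.insert(0, TempArrName.pop())
-- 	return " ".join(TempArrName)
--
-- def First_To_Last_Name(Name):
-- 	TempArrName = Name.split(" ")
-- 	TempArrName.append(TempArrName.pop(0))
-- 	return " ".join(TempArrName)
--
-- def Sort_Name(NameList):
-- 	for idx in range(len(NameList)):
-- 		NameList[idx] = NameList[idx].lower()
-- 		NameList[idx] = Last_To_First_Name(NameList[idx])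
--
-- 	NameList.sort()
--
-- 	for idx in range(len(NameList)):
-- 		NameList[idx] = First_To_Last_Name(NameList[idx])
-- 		NameList[idx] = Captalize_First_Letter_In_Name(NameList[idx])
--
-- 	return NameList
--
-- def Captalize_First_Letter_In_Name(Name):
-- 	TempArrName = Name.split(" ")
-- 	for idx in range(len(TempArrName)):
-- 		TempArrName[idx] = TempArrName[idx].capitalize()
-- 	return " ".join(TempArrName)
-- ===== SOURCE B (Python) =====
-- def _key(name):
-- 	# "last first middle..." lowercase sort key, built by locating the last space directly
-- 	s = name.lower()
-- 	i = len(s) - 1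
-- 	while i >= 0 and s[i] != " ":
-- 		i -= 1
-- 	if i < 0:
-- 		return s
-- 	return s[i + 1:] + " " + s[:i]
--
-- def _cap(name):
-- 	# capitalize each space-separated word in one character pass
-- 	out = []
-- 	start = True
-- 	for ch in name:
-- 		if ch == " ":
-- 			out.append(ch)
-- 			start = True
-- 		elif start:
-- 			out.append(ch.upper())
-- 			start = False
-- 		else:
-- 			out.append(ch.lower())
-- 	return "".join(out)
--
-- def Sort_Name(NameList):
-- 	# stable binary-search insertion into a parallel, already-sorted key list
-- 	keys = []
-- 	ordered = []
-- 	for name in NameList: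
-- 		k = _key(name)
-- 		lo = 0
-- 		hi = len(keys)
-- 		while lo < hi:
-- 			mid = (lo + hi) // 2
-- 			if k < keys[mid]:
-- 				hi = mid
-- 			else:
-- 				lo = mid + 1
-- 		keys.insert(lo, k)
-- 		ordered.insert(lo, name)
-- 	NameList[:] = [_cap(n) for n in ordered]
-- 	return NameList
-- ===== Notes on version B (the rewrite author's own statement) =====
-- stated objective: alternative
-- what changed: Replaces A's three staged list rewrites (decorate every name via split/pop/insert/join, library sort, undo-and-recapitalize via split/join again) with a split-free pipeline: the sort key is built by scanning for the last space directly, the names are ordered by stable binary-search insertion into a parallel sorted key list (each key computed once), and capitalization is one character pass with a word-start flag; the inverse transform First_To_Last_Name disappears entirely.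
import Mathlib
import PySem

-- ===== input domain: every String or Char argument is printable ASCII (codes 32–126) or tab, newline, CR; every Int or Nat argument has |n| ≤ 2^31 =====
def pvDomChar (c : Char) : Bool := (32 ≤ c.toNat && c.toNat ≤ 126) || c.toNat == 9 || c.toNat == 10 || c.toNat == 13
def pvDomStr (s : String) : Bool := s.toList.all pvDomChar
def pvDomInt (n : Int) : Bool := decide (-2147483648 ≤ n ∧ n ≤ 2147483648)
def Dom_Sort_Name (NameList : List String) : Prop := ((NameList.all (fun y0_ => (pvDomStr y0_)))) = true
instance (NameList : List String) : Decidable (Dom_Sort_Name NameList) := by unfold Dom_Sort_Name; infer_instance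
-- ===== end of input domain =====

-- B replaces A's split/join decorate-sort-undecorate with a split-free pipeline: a
-- last-space scan builds the sort key, an explicit stable insertion sort orders the
-- original names, and one character pass recapitalizes (same asymptotic cost per name;
-- both Pythons mutate NameList in place to the same final list).

-- ===== PORT A =====
def pvLastToFirst (Name : String) : String :=
  match PySem.Str.split? Name " " with
  | some t =>
    match PySem.List.pop? t (-1) with
    | some (x, rest) => PySem.Str.join " " (PySem.List.insert rest 0 x)
    | none => Name      -- unreachable: split(" ") never returns an empty list
  | none => Name        -- unreachable: the separator " " is non-empty

def pvFirstToLast (Name : String) : String :=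
  match PySem.Str.split? Name " " with
  | some t =>
    match PySem.List.pop? t 0 with
    | some (x, rest) => PySem.Str.join " " (rest ++ [x])
    | none => Name      -- unreachable: split(" ") never returns an empty list
  | none => Name        -- unreachable: the separator " " is non-empty

-- word.capitalize() ported as first char uppercased, rest lowercased — exact on
-- the printable-ASCII domain Dom_Sort_Name
def pvCapWord (w : String) : String :=
  match w.toList with
  | [] => w
  | c :: cs => String.ofList (PySem.Chars.upperChar c :: PySem.Chars.lower cs)

def pvCapitalizeName (Name : String) : String :=
  match PySem.Str.split? Name " " with
  | some t => PySem.Str.join " " (t.map pvCapWord)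
  | none => Name        -- unreachable: the separator " " is non-empty

def Sort_Name (NameList : List String) : List String :=
  let l1 := NameList.map (fun n => pvLastToFirst (PySem.Str.lower n))
  let l2 := PySem.List.sorted l1 (fun x => x)
  l2.map (fun n => pvCapitalizeName (pvFirstToLast n))

-- ===== PORT B =====
-- B's `while i >= 0 and s[i] != " "` loop, scanning right-to-left for the last space,
-- ported as the obvious structural recursion (the suffix is scanned first): returns
-- `some (s[:i], s[i+1:])` for the last space position i, `none` if there is no space.
def pvSplitLastSpace : List Char → Option (List Char × List Char)
  | [] => none
  | c :: rest =>
    match pvSplitLastSpace rest with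
    | some (i, w) => some (c :: i, w)
    | none => if c = ' ' then some ([], rest) else none

def pvKeyB (name : String) : String :=
  let s := PySem.Str.lower name
  match pvSplitLastSpace s.toList with
  | none => s                                        -- i < 0: no space
  | some (i, w) => String.ofList (w ++ ' ' :: i)     -- s[i+1:] + " " + s[:i]

-- B's single character pass with a word-start flag (ch.upper()/ch.lower() are exact
-- single-char maps on the printable-ASCII domain)
def pvCapGo : Bool → List Char → List Char
  | _, [] => []
  | start, c :: cs =>
    if c = ' ' then ' ' :: pvCapGo true cs
    else if start then PySem.Chars.upperChar c :: pvCapGo false cs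
    else PySem.Chars.lowerChar c :: pvCapGo false cs

def pvCapB (name : String) : String := String.ofList (pvCapGo true name.toList)

-- B's binary-search while loop: returns the stable insertion point for k in keys[lo:hi]
-- (keys[mid] ported with getD; every probed index satisfies mid < hi ≤ len, so it is exact)
def pvBisect (keys : List String) (k : String) (lo hi : Nat) : Nat :=
  if h : lo < hi then
    let mid := (lo + hi) / 2
    if k < keys.getD mid "" then pvBisect keys k lo mid
    else pvBisect keys k (mid + 1) hi
  else lo
termination_by hi - lo
decreasing_by all_goals omega

def Sort_Name_alt (NameList : List String) : List String :=
  -- B's outer for-loop threading the parallel (keys, ordered) pair;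
  -- list.insert(j, v) at an in-range index j ported as take j ++ v :: drop j
  let st := NameList.foldl (fun (st : List String × List String) name =>
    let k := pvKeyB name
    let j := pvBisect st.1 k 0 st.1.length
    (st.1.take j ++ k :: st.1.drop j, st.2.take j ++ name :: st.2.drop j)) ([], [])
  st.2.map pvCapB

-- ===== PRECONDITION & SPEC =====
def Spec_Sort_Name (NameList : List String) (out : List String) : Prop := out = Sort_Name_alt NameList
instance (NameList : List String) (out : List String) : Decidable (Spec_Sort_Name NameList out) := by unfold Spec_Sort_Name; infer_instance

-- ===== CLAIM (what is proved, stated in full; the proofs are below) =====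
def Claim_equal_Sort_Name : Prop := ∀ (NameList : List String), Dom_Sort_Name NameList → Spec_Sort_Name NameList (Sort_Name NameList)

-- ===== LEMMAS AND PROOFS =====

-- character layer: PySem's ASCII case maps are Batteries' Char.toLower / Char.toUpper
theorem pv_isupper_eq (c : Char) : PySem.Chars.isupper c = c.isUpper := by
  rw [Bool.eq_iff_iff]
  simp [PySem.Chars.isupper, Char.isUpper, Char.le_def, ge_iff_le]

theorem pv_islower_eq (c : Char) : PySem.Chars.islower c = c.isLower := by
  rw [Bool.eq_iff_iff]
  simp [PySem.Chars.islower, Char.isLower, Char.le_def, ge_iff_le]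

theorem pv_lowerChar_eq (c : Char) : PySem.Chars.lowerChar c = c.toLower := by
  rw [PySem.Chars.lowerChar, pv_isupper_eq]
  by_cases h : c.isUpper
  · rw [if_pos h, Char.toLower_eq_of_isUpper h]
  · rw [if_neg h, Char.toLower_eq_of_not_isUpper h]

theorem pv_upperChar_eq (c : Char) : PySem.Chars.upperChar c = c.toUpper := by
  rw [PySem.Chars.upperChar, pv_islower_eq]
  by_cases h : c.isLower
  · rw [if_pos h, Char.toUpper_eq_of_isLower h]
  · rw [if_neg h, Char.toUpper_eq_of_not_isLower h]

theorem pv_upperChar_lowerChar (c : Char) :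
    PySem.Chars.upperChar (PySem.Chars.lowerChar c) = PySem.Chars.upperChar c := by
  rw [pv_upperChar_eq, pv_lowerChar_eq, pv_upperChar_eq, Char.toUpper_toLower_eq_toUpper]

theorem pv_lowerChar_lowerChar (c : Char) :
    PySem.Chars.lowerChar (PySem.Chars.lowerChar c) = PySem.Chars.lowerChar c := by
  rw [pv_lowerChar_eq, pv_lowerChar_eq, Char.toLower_toLower_eq_toLower]

theorem pv_lowerChar_space_iff (c : Char) : (PySem.Chars.lowerChar c = ' ') ↔ c = ' ' := by
  rw [pv_lowerChar_eq]
  constructor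
  · intro h
    have ha : c.isAlpha = false := by
      have := Char.isAlpha_toLower_eq_isAlpha c
      rw [h] at this
      exact this.symm
    have hu : ¬ c.isUpper := by
      intro hu
      simp [Char.isAlpha, hu] at ha
    rwa [Char.toLower_eq_of_not_isUpper hu] at h
  · intro h; subst h; rfl

-- splitter layer: PySem.Chars.splitOn with a single-character separator is List.splitOn
theorem pv_go_eq (c : Char) (fuel : Nat) (l cur : List Char) (acc : List (List Char))
    (h : l.length < fuel) :
    PySem.Chars.splitOn.go [c] fuel l cur acc
      = acc.reverse ++ (l.splitOn c).modifyHead (cur.reverse ++ ·) := by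
  induction fuel generalizing l cur acc with
  | zero => omega
  | succ f ih =>
    cases l with
    | nil =>
      simp [PySem.Chars.splitOn.go, List.splitOn, List.splitOnP_nil]
    | cons a rest =>
      rw [PySem.Chars.splitOn.go]
      by_cases hac : a = c
      · subst hac
        have hp : List.isPrefixOf [a] (a :: rest) = true := by simp [List.isPrefixOf]
        rw [if_pos hp]
        simp only [List.length_cons, List.drop_succ_cons, List.length_nil, List.drop_zero]
        rw [ih rest [] (cur.reverse :: acc) (by simpa using Nat.lt_of_succ_lt_succ (by simpa using h))]
        simp [List.splitOn, List.splitOnP_cons, List.modifyHead]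
        cases hsp : List.splitOnP (fun x => x == a) rest <;> simp
      · rw [if_neg (by simp [List.isPrefixOf]; intro hh; exact hac hh.symm)]
        rw [ih rest (a :: cur) acc (by simpa using Nat.lt_of_succ_lt_succ (by simpa using h))]
        simp only [List.splitOn, List.splitOnP_cons, beq_iff_eq, if_neg hac]
        congr 1
        cases hsp : List.splitOnP (fun x => x == c) rest <;> simp

theorem pv_splitOn_single (c : Char) (cs : List Char) :
    PySem.Chars.splitOn cs [c] = cs.splitOn c := by
  rw [PySem.Chars.splitOn, pv_go_eq c (cs.length + 1) cs [] [] (by omega)]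
  cases hsp : cs.splitOn c <;> simp

theorem pv_not_mem_splitOn (c : Char) (cs : List Char) :
    ∀ p ∈ cs.splitOn c, c ∉ p := by
  induction cs with
  | nil => intro p hp; simp [List.splitOn, List.splitOnP_nil] at hp; simp [hp]
  | cons a rest ih =>
    intro p hp
    simp only [List.splitOn, List.splitOnP_cons] at hp ih
    by_cases hac : a = c
    · subst hac
      simp at hp
      rcases hp with h | h
      · simp [h]
      · exact ih p h
    · rw [if_neg (by simp [hac])] at hp
      cases hsp : List.splitOnP (fun x => x == c) rest with
      | nil => exact absurd hsp (List.splitOnP_ne_nil _ _)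
      | cons q qs =>
        rw [hsp] at hp
        simp only [List.modifyHead] at hp
        rcases List.mem_cons.mp hp with h | h
        · subst h
          intro hm
          rcases List.mem_cons.mp hm with h | h
          · exact hac h.symm
          · exact ih q (by rw [hsp]; exact List.mem_cons_self) h
        · exact ih p (by rw [hsp]; exact List.mem_cons_of_mem _ h)

theorem pv_splitOn_map_lower (cs : List Char) :
    (cs.map PySem.Chars.lowerChar).splitOn ' '
      = (cs.splitOn ' ').map (List.map PySem.Chars.lowerChar) := by
  induction cs with
  | nil => simp [List.splitOn, List.splitOnP_nil]
  | cons a rest ih =>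
    simp only [List.map_cons, List.splitOn, List.splitOnP_cons] at *
    by_cases ha : a = ' '
    · subst ha
      simp [PySem.Chars.lowerChar, PySem.Chars.isupper, ih]
    · have h1 : ¬ PySem.Chars.lowerChar a = ' ' := fun hh => ha ((pv_lowerChar_space_iff a).mp hh)
      rw [if_neg (by simp [h1]), if_neg (by simp [ha]), ih]
      cases hsp : List.splitOnP (fun x => x == ' ') rest with
      | nil => exact absurd hsp (List.splitOnP_ne_nil _ _)
      | cons q qs => simp

-- splitOn of a space-free list, and splitOn across the last space
theorem pv_splitOn_space_free (v : List Char) (h : ' ' ∉ v) : v.splitOn ' ' = [v] := by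
  induction v with
  | nil => simp [List.splitOn, List.splitOnP_nil]
  | cons a rest ih =>
    have ha : a ≠ ' ' := fun hh => h (hh ▸ List.mem_cons_self)
    have hr := ih (fun hm => h (List.mem_cons_of_mem _ hm))
    show (a :: rest).splitOn ' ' = [a :: rest]
    rw [List.splitOn, List.splitOnP_cons, if_neg (by simp [ha]), ← List.splitOn, hr]
    rfl

theorem pv_splitOn_last (i w : List Char) (hw : ' ' ∉ w) :
    (i ++ ' ' :: w).splitOn ' ' = i.splitOn ' ' ++ [w] := by
  induction i with
  | nil =>
    show (' ' :: w).splitOn ' ' = [].splitOn ' ' ++ [w]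
    rw [List.splitOn, List.splitOnP_cons]
    simp only [beq_self_eq_true, if_true]
    rw [← List.splitOn, pv_splitOn_space_free w hw]
    rfl
  | cons a rest ih =>
    by_cases ha : a = ' '
    · subst ha
      show (' ' :: (rest ++ ' ' :: w)).splitOn ' ' = (' ' :: rest).splitOn ' ' ++ [w]
      rw [List.splitOn, List.splitOnP_cons, List.splitOn, List.splitOnP_cons]
      simp only [beq_self_eq_true, if_true]
      rw [← List.splitOn, ← List.splitOn, ih]
      rfl
    · show (a :: (rest ++ ' ' :: w)).splitOn ' ' = (a :: rest).splitOn ' ' ++ [w]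
      rw [List.splitOn, List.splitOnP_cons, List.splitOn, List.splitOnP_cons]
      rw [if_neg (by simp [ha]), if_neg (by simp [ha])]
      rw [← List.splitOn, ← List.splitOn, ih]
      cases hsp : rest.splitOn ' ' with
      | nil => exact absurd hsp (List.splitOnP_ne_nil _ _)
      | cons q qs => rfl

-- spec of B's right-to-left scan
theorem pv_splitLastSpace_none (cs : List Char) (h : pvSplitLastSpace cs = none) : ' ' ∉ cs := by
  induction cs with
  | nil => simp
  | cons c rest ih =>
    rw [pvSplitLastSpace] at h
    cases hr : pvSplitLastSpace rest with
    | some p => rw [hr] at h; cases p; simp at h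
    | none =>
      rw [hr] at h
      by_cases hc : c = ' '
      · rw [if_pos hc] at h; simp at h
      · rw [if_neg hc] at h
        intro hm
        rcases List.mem_cons.mp hm with hh | hh
        · exact hc hh.symm
        · exact ih hr hh

theorem pv_splitLastSpace_some (cs i w : List Char) (h : pvSplitLastSpace cs = some (i, w)) :
    cs = i ++ ' ' :: w ∧ ' ' ∉ w := by
  induction cs generalizing i w with
  | nil => simp [pvSplitLastSpace] at h
  | cons c rest ih =>
    rw [pvSplitLastSpace] at h
    cases hr : pvSplitLastSpace rest with
    | some p =>
      obtain ⟨i', w'⟩ := p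
      rw [hr] at h
      simp only [Option.some.injEq, Prod.mk.injEq] at h
      obtain ⟨hi, hw⟩ := h
      obtain ⟨h1, h2⟩ := ih i' w' hr
      subst hw
      rw [← hi, h1]
      exact ⟨rfl, h2⟩
    | none =>
      rw [hr] at h
      by_cases hc : c = ' '
      · rw [if_pos hc] at h
        simp only [Option.some.injEq, Prod.mk.injEq] at h
        obtain ⟨hi, hw⟩ := h
        subst hc; subst hw
        rw [← hi]
        exact ⟨rfl, pv_splitLastSpace_none rest hr⟩
      · rw [if_neg hc] at h; simp at h

-- list layer: the two pops A's helpers perform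
theorem pv_eraseIdx_concat {α : Type} (ys : List α) (y : α) :
    (ys ++ [y]).eraseIdx ys.length = ys := by
  induction ys <;> simp_all

theorem pv_pop_concat {α : Type} (ys : List α) (y : α) :
    PySem.List.pop? (ys ++ [y]) (-1) = some (y, ys) := by
  simp [PySem.List.pop?, PySem.List.pyIdx?, pv_eraseIdx_concat]

theorem pv_pop_cons {α : Type} (x : α) (xs : List α) :
    PySem.List.pop? (x :: xs) 0 = some (x, xs) := by
  simp [PySem.List.pop?, PySem.List.pyIdx?]

-- string layer
theorem pv_split_eq (s : String) :
    PySem.Str.split? s " " = some ((s.toList.splitOn ' ').map String.ofList) := by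
  have h : (" " : String).toList = [' '] := rfl
  simp [PySem.Str.split?, PySem.Chars.split?, h, pv_splitOn_single]

theorem pv_join_eq (parts : List (List Char)) :
    PySem.Str.join " " (parts.map String.ofList) = String.ofList ([' '].intercalate parts) := by
  have h : (" " : String).toList = [' '] := rfl
  simp [PySem.Str.join, PySem.Chars.join, h, List.map_map, Function.comp_def, String.toList_ofList]

theorem pv_intercalate_cons (w : List Char) (l : List (List Char)) (h : l ≠ []) :
    [' '].intercalate (w :: l) = w ++ ' ' :: [' '].intercalate l := by
  cases l with
  | nil => exact absurd rfl h
  | cons x rest => simp [List.intercalate]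

-- First_To_Last_Name undoes Last_To_First_Name (on every string)
theorem pv_ftl_ltf (s : String) : pvFirstToLast (pvLastToFirst s) = s := by
  have hne : s.toList.splitOn ' ' ≠ [] := List.splitOnP_ne_nil _ _
  rcases (List.eq_nil_or_concat (s.toList.splitOn ' ')).resolve_left hne with ⟨init, last, hw⟩
  rw [List.concat_eq_append] at hw
  have hfree : ∀ p ∈ last :: init, ' ' ∉ p := by
    intro p hp
    rcases List.mem_cons.mp hp with h | h
    · exact pv_not_mem_splitOn ' ' s.toList p (by rw [hw]; subst h; exact List.mem_append_right _ List.mem_cons_self)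
    · exact pv_not_mem_splitOn ' ' s.toList p (by rw [hw]; exact List.mem_append_left _ h)
  have h1 : pvLastToFirst s = String.ofList ([' '].intercalate (last :: init)) := by
    rw [pvLastToFirst, pv_split_eq, hw]
    simp only [List.map_append, List.map_cons, List.map_nil, pv_pop_concat, PySem.List.insert_zero]
    exact pv_join_eq (last :: init)
  rw [h1, pvFirstToLast, pv_split_eq]
  rw [String.toList_ofList, List.splitOn_intercalate (last :: init) ' ' hfree (by simp)]
  simp only [List.map_cons, pv_pop_cons]
  have h2 : (init.map String.ofList) ++ [String.ofList last] = (init ++ [last]).map String.ofList := by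
    simp
  rw [h2, pv_join_eq, ← hw, List.intercalate_splitOn, String.ofList_toList]

-- B's key equals A's decoration Last_To_First_Name(name.lower())
theorem pv_pop_singleton {α : Type} (x : α) :
    PySem.List.pop? [x] (-1) = some (x, []) := by
  simp [PySem.List.pop?, PySem.List.pyIdx?]

theorem pv_key_eq (n : String) : pvKeyB n = pvLastToFirst (PySem.Str.lower n) := by
  cases hs : pvSplitLastSpace (PySem.Str.lower n).toList with
  | none =>
    have hfree := pv_splitLastSpace_none _ hs
    simp only [pvKeyB, hs, pvLastToFirst, pv_split_eq, pv_splitOn_space_free _ hfree,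
      List.map_cons, List.map_nil, pv_pop_singleton, PySem.List.insert_zero]
    have hj := pv_join_eq [(PySem.Str.lower n).toList]
    simp only [List.map_cons, List.map_nil] at hj
    rw [hj]
    simp [List.intercalate, PySem.Str.lower]
  | some p =>
    obtain ⟨i, w⟩ := p
    obtain ⟨hcs, hw⟩ := pv_splitLastSpace_some _ i w hs
    have hmap : (i.splitOn ' ' ++ [w]).map String.ofList
        = (i.splitOn ' ').map String.ofList ++ [String.ofList w] := by simp
    simp only [pvKeyB, hs]
    simp only [pvLastToFirst, pv_split_eq, hcs, pv_splitOn_last i w hw,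
      hmap, pv_pop_concat, PySem.List.insert_zero]
    have h2 : String.ofList w :: (i.splitOn ' ').map String.ofList
        = (w :: i.splitOn ' ').map String.ofList := by simp
    have hne : i.splitOn ' ' ≠ [] := by
      rw [List.splitOn]; exact List.splitOnP_ne_nil _ _
    rw [h2, pv_join_eq, pv_intercalate_cons w _ hne, List.intercalate_splitOn]

-- capitalization on the character-list level
def pvCapW (w : List Char) : List Char :=
  match w with
  | [] => []
  | c :: cs => PySem.Chars.upperChar c :: PySem.Chars.lower cs

theorem pv_capWord_ofList (w : List Char) : pvCapWord (String.ofList w) = String.ofList (pvCapW w) := by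
  cases w with
  | nil => simp [pvCapWord, pvCapW]
  | cons c cs => simp [pvCapWord, pvCapW, String.toList_ofList]

-- B's single pass computes the split/capitalize/join of A, both flag states at once
theorem pv_capGo_spec (cs : List Char) :
    pvCapGo true cs = [' '].intercalate ((cs.splitOn ' ').map pvCapW)
    ∧ ∀ w0 ws, cs.splitOn ' ' = w0 :: ws →
        pvCapGo false cs = [' '].intercalate (PySem.Chars.lower w0 :: ws.map pvCapW) := by
  induction cs with
  | nil =>
    refine ⟨by simp [pvCapGo, List.splitOn, List.splitOnP_nil, List.intercalate, pvCapW], ?_⟩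
    intro w0 ws h
    have h' : ([[]] : List (List Char)) = w0 :: ws := by
      simpa [List.splitOn, List.splitOnP_nil] using h
    injection h' with h1 h2
    subst h1; subst h2
    simp [pvCapGo, List.intercalate, PySem.Chars.lower]
  | cons c rest ih =>
    obtain ⟨ih1, ih2⟩ := ih
    obtain ⟨w0, ws, hsp⟩ : ∃ w0 ws, rest.splitOn ' ' = w0 :: ws := by
      cases h : rest.splitOn ' ' with
      | nil => exact absurd (by rw [List.splitOn] at h; exact h) (List.splitOnP_ne_nil _ _)
      | cons a b => exact ⟨a, b, rfl⟩
    have hne : (rest.splitOn ' ').map pvCapW ≠ [] := by rw [hsp]; simp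
    by_cases hc : c = ' '
    · subst hc
      have hsplit : (' ' :: rest).splitOn ' ' = [] :: rest.splitOn ' ' := by
        rw [List.splitOn, List.splitOnP_cons, ← List.splitOn]
        simp
      have hmain : pvCapGo true (' ' :: rest)
          = [' '].intercalate (((' ' :: rest).splitOn ' ').map pvCapW) := by
        rw [hsplit, List.map_cons, pv_intercalate_cons _ _ hne]
        simp only [pvCapGo, ih1]
        rfl
      refine ⟨hmain, ?_⟩
      intro v0 vs hv
      rw [hsplit] at hv
      injection hv with hv0 hvs
      subst hv0; subst hvs
      rw [pv_intercalate_cons _ _ hne]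
      simp only [pvCapGo, ih1, hsp]
      rfl
    · have hsplit : (c :: rest).splitOn ' ' = (c :: w0) :: ws := by
        rw [List.splitOn, List.splitOnP_cons, if_neg (by simp [hc]), ← List.splitOn, hsp]
        rfl
      have hfalse := ih2 w0 ws hsp
      have hgo_t : pvCapGo true (c :: rest) = PySem.Chars.upperChar c :: pvCapGo false rest := by
        simp [pvCapGo, hc]
      have hgo_f : pvCapGo false (c :: rest) = PySem.Chars.lowerChar c :: pvCapGo false rest := by
        simp [pvCapGo, hc]
      constructor
      · rw [hgo_t, hfalse, hsplit, List.map_cons]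
        cases ws with
        | nil => simp [List.intercalate, pvCapW, PySem.Chars.lower]
        | cons a b =>
          rw [pv_intercalate_cons _ _ (by simp), pv_intercalate_cons _ _ (by simp)]
          simp [pvCapW, PySem.Chars.lower]
      · intro v0 vs hv
        rw [hsplit] at hv
        injection hv with hv0 hvs
        subst hv0; subst hvs
        rw [hgo_f, hfalse]
        cases ws with
        | nil => simp [List.intercalate, PySem.Chars.lower]
        | cons a b =>
          rw [pv_intercalate_cons _ _ (by simp), pv_intercalate_cons _ _ (by simp)]
          simp [PySem.Chars.lower]

-- B's one-pass capitalizer equals A's split/capitalize/join helper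
theorem pv_capB_eq (n : String) : pvCapB n = pvCapitalizeName n := by
  have hmap : ((n.toList.splitOn ' ').map String.ofList).map pvCapWord
      = ((n.toList.splitOn ' ').map pvCapW).map String.ofList := by
    simp only [List.map_map]
    exact List.map_congr_left (fun w _ => pv_capWord_ofList w)
  simp only [pvCapitalizeName, pv_split_eq]
  rw [hmap, pv_join_eq, pvCapB, (pv_capGo_spec n.toList).1]

-- capitalization ignores the case of its input
theorem pv_capWord_lower (w : List Char) :
    pvCapWord (String.ofList (w.map PySem.Chars.lowerChar)) = pvCapWord (String.ofList w) := by
  cases w with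
  | nil => simp [pvCapWord]
  | cons c cs =>
    simp only [pvCapWord, List.map_cons, String.toList_ofList]
    rw [pv_upperChar_lowerChar]
    have : PySem.Chars.lower (cs.map PySem.Chars.lowerChar) = PySem.Chars.lower cs := by
      simp only [PySem.Chars.lower, List.map_map]
      exact List.map_congr_left (fun x _ => pv_lowerChar_lowerChar x)
    rw [this]

theorem pv_cap_lower (s : String) :
    pvCapitalizeName (PySem.Str.lower s) = pvCapitalizeName s := by
  rw [pvCapitalizeName, pvCapitalizeName, pv_split_eq, pv_split_eq]
  have hl : (PySem.Str.lower s).toList = s.toList.map PySem.Chars.lowerChar := by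
    rw [PySem.Str.toList_lower, PySem.Chars.lower]
  rw [hl, pv_splitOn_map_lower]
  simp only [List.map_map]
  congr 1
  exact List.map_congr_left (fun w _ => pv_capWord_lower w)

-- the pointwise fact A's post-sort pass reduces to
theorem pv_pointwise (x : String) :
    pvCapitalizeName (pvFirstToLast (pvLastToFirst (PySem.Str.lower x))) = pvCapitalizeName x := by
  rw [pv_ftl_ltf, pv_cap_lower]

-- binary-search layer: on a sorted key list pvBisect finds the stable insertion point
theorem pv_bisect_spec (keys : List String) (k : String)
    (hs : ∀ i j (_ : i < keys.length) (_ : j < keys.length), i ≤ j → keys[i] ≤ keys[j]) :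
    ∀ n lo hi, hi - lo ≤ n → lo ≤ hi → hi ≤ keys.length →
    (∀ i (_ : i < keys.length), i < lo → ¬ k < keys[i]) →
    (∀ i (_ : i < keys.length), hi ≤ i → k < keys[i]) →
    lo ≤ pvBisect keys k lo hi ∧ pvBisect keys k lo hi ≤ hi ∧
    (∀ i (_ : i < keys.length), i < pvBisect keys k lo hi → ¬ k < keys[i]) ∧
    (∀ i (_ : i < keys.length), pvBisect keys k lo hi ≤ i → k < keys[i]) := by
  intro n
  induction n with
  | zero =>
    intro lo hi hn hlh hhi hL hR
    have heq : lo = hi := by omega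
    rw [pvBisect, dif_neg (by omega)]
    exact ⟨le_rfl, by omega, hL, fun i hx hge => hR i hx (by omega)⟩
  | succ n ih =>
    intro lo hi hn hlh hhi hL hR
    by_cases h : lo < hi
    · rw [pvBisect, dif_pos h]
      have hmidlt : (lo + hi) / 2 < hi := by omega
      have hmidge : lo ≤ (lo + hi) / 2 := by omega
      have hmidlen : (lo + hi) / 2 < keys.length := by omega
      by_cases hcmp : k < keys.getD ((lo + hi) / 2) ""
      · rw [if_pos hcmp]
        have hcmp' : k < keys[(lo + hi) / 2] := by
          rwa [List.getD_eq_getElem keys "" hmidlen] at hcmp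
        have hR' : ∀ i (_ : i < keys.length), (lo + hi) / 2 ≤ i → k < keys[i] := by
          intro i hilen hge
          exact lt_of_lt_of_le hcmp' (hs _ _ hmidlen hilen hge)
        have := ih lo ((lo + hi) / 2) (by omega) (by omega) (by omega) hL hR'
        exact ⟨this.1, le_trans this.2.1 (le_of_lt hmidlt), this.2.2.1, this.2.2.2⟩
      · rw [if_neg hcmp]
        have hcmp' : ¬ k < keys[(lo + hi) / 2] := by
          rwa [List.getD_eq_getElem keys "" hmidlen] at hcmp
        have hL' : ∀ i (_ : i < keys.length), i < (lo + hi) / 2 + 1 → ¬ k < keys[i] := by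
          intro i hilen hlt
          intro hki
          exact hcmp' (lt_of_lt_of_le hki (hs _ _ hilen hmidlen (by omega)))
        have := ih ((lo + hi) / 2 + 1) hi (by omega) (by omega) hhi hL' hR
        exact ⟨le_trans (by omega) this.1, this.2.1, this.2.2.1, this.2.2.2⟩
    · rw [pvBisect, dif_neg h]
      exact ⟨le_rfl, by omega, hL, fun i hx hge => hR i hx (by omega)⟩

-- insertBy at a position characterized by the bisect boundary conditions
theorem pv_insertBy_eq_take_drop {α : Type} (key : α → String) (x : α) :
    ∀ (ys : List α) (j : Nat), j ≤ ys.length →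
    (∀ i (_ : i < ys.length), i < j → ¬ key x < key ys[i]) →
    (∀ i (_ : i < ys.length), j ≤ i → key x < key ys[i]) →
    PySem.List.insertBy (fun a b => decide (key a < key b)) x ys
      = ys.take j ++ x :: ys.drop j := by
  intro ys
  induction ys with
  | nil =>
    intro j hj _ _
    simp only [List.length_nil, Nat.le_zero] at hj
    subst hj
    simp [PySem.List.insertBy]
  | cons y ys' ihy =>
    intro j hj hA hB
    cases j with
    | zero =>
      have h0 : key x < key y := hB 0 (by simp) (by omega)
      simp [PySem.List.insertBy, h0]
    | succ j' =>
      have h0 : ¬ key x < key y := hA 0 (by simp) (by omega)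
      have hrest := ihy j' (by simpa using hj)
        (fun i hi hlt => hA (i + 1) (by simpa using hi) (by omega))
        (fun i hi hge => hB (i + 1) (by simpa using hi) (by omega))
      simp only [PySem.List.insertBy, decide_eq_true_eq, if_neg h0,
        List.take_succ_cons, List.drop_succ_cons, List.cons_append]
      rw [hrest]

-- the fold invariant: B's (keys, ordered) pair tracks the stable-sorted prefix
theorem pv_fold_eq (names : List String) : ∀ (p : List String),
    names.foldl (fun (st : List String × List String) name =>
        let k := pvKeyB name
        let j := pvBisect st.1 k 0 st.1.length
        (st.1.take j ++ k :: st.1.drop j, st.2.take j ++ name :: st.2.drop j))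
      ((PySem.List.sorted p pvKeyB).map pvKeyB, PySem.List.sorted p pvKeyB)
      = ((PySem.List.sorted (p ++ names) pvKeyB).map pvKeyB,
         PySem.List.sorted (p ++ names) pvKeyB) := by
  induction names with
  | nil => intro p; simp
  | cons x rest ih =>
    intro p
    rw [List.foldl_cons]
    set ord := PySem.List.sorted p pvKeyB with hord
    set keys := ord.map pvKeyB with hkeys
    have hlen : keys.length = ord.length := by rw [hkeys, List.length_map]
    have hs : ∀ i j (_ : i < keys.length) (_ : j < keys.length), i ≤ j → keys[i] ≤ keys[j] := by
      have hp : keys.Pairwise (· ≤ ·) :=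
        List.pairwise_map.mpr (PySem.List.sorted_pairwise p pvKeyB)
      intro i j hi hj hij
      rcases Nat.lt_or_ge i j with hlt | hge
      · exact List.pairwise_iff_getElem.mp hp i j hi hj hlt
      · have : i = j := by omega
        subst this; exact le_rfl
    have hspec := pv_bisect_spec keys (pvKeyB x) hs keys.length 0 keys.length
      (by omega) (by omega) le_rfl (by omega) (by intro i hi hge; omega)
    set j := pvBisect keys (pvKeyB x) 0 keys.length with hj
    have hkey_idx : ∀ i (_ : i < ord.length), keys[i] = pvKeyB ord[i] := by
      intro i hi
      simp [hkeys]
    have hins : PySem.List.insertBy (fun a b => decide (pvKeyB a < pvKeyB b)) x ord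
        = ord.take j ++ x :: ord.drop j := by
      apply pv_insertBy_eq_take_drop pvKeyB x ord j (by omega)
      · intro i hi hlt
        rw [← hkey_idx i hi]
        exact hspec.2.2.1 i (by omega) hlt
      · intro i hi hge
        rw [← hkey_idx i hi]
        exact hspec.2.2.2 i (by omega) hge
    have hsorted_step : PySem.List.sorted (p ++ [x]) pvKeyB
        = ord.take j ++ x :: ord.drop j := by
      rw [← hins, PySem.List.sorted_eq_foldl_insertBy (p ++ [x]) pvKeyB, List.foldl_append,
        ← PySem.List.sorted_eq_foldl_insertBy p pvKeyB]
      rfl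
    have hkeys_step : keys.take j ++ pvKeyB x :: keys.drop j
        = (ord.take j ++ x :: ord.drop j).map pvKeyB := by
      rw [hkeys]
      simp [List.map_take, List.map_drop]
    have happ : p ++ x :: rest = (p ++ [x]) ++ rest := by simp
    rw [happ, ← ih (p ++ [x]), hsorted_step]
    exact congrArg (fun q => List.foldl _ q rest) (congrArg₂ Prod.mk hkeys_step rfl)

-- ===== VERDICT (by name: the statement is the Claim_ definition above) =====
theorem Sort_Name_spec : Claim_equal_Sort_Name := by
  intro NameList _
  unfold Spec_Sort_Name Sort_Name Sort_Name_alt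
  set k : String → String := fun n => pvLastToFirst (PySem.Str.lower n) with hk
  have hkey : pvKeyB = k := funext (fun n => pv_key_eq n)
  have h1 : PySem.List.sorted (NameList.map k) (fun x => x)
      = (PySem.List.sorted NameList k).map k :=
    PySem.List.sorted_id_eq_of_perm_of_pairwise _ _
      ((PySem.List.sorted_perm NameList k false).map k)
      (List.pairwise_map.mpr (PySem.List.sorted_pairwise NameList k))
  have hB : (NameList.foldl (fun (st : List String × List String) name =>
        let kx := pvKeyB name
        let j := pvBisect st.1 kx 0 st.1.length
        (st.1.take j ++ kx :: st.1.drop j, st.2.take j ++ name :: st.2.drop j)) ([], [])).2.map pvCapB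
      = (PySem.List.sorted NameList k).map pvCapitalizeName := by
    have hfold := pv_fold_eq NameList []
    have hnil : PySem.List.sorted ([] : List String) pvKeyB = [] := by
      have := PySem.List.sorted_eq_nil_iff ([] : List String) pvKeyB false
      exact this.mpr rfl
    rw [hnil] at hfold
    simp only [List.map_nil, List.nil_append] at hfold
    rw [hfold, hkey]
    exact List.map_congr_left (fun x _ => pv_capB_eq x)
  show (PySem.List.sorted (NameList.map k) (fun x => x)).map
      (fun n => pvCapitalizeName (pvFirstToLast n)) = _
  rw [h1, List.map_map, hB]
  exact List.map_congr_left (fun x _ => pv_pointwise x)
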